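-- pv_equiv track=rewrite | github.com/francisduvivier/aoc-agent | rw/solutions/2025/day06/solution_part2_verify.py | split_into_columns
-- ===== SOURCE A (Python) =====
-- def split_into_columns(grid):
--     # Find column boundaries by looking for full columns of spaces
--     width = len(grid[0])
--     height = len(grid)
--
--     # Identify columns that are entirely spaces (separators)
--     separator_cols = []
--     for col in range(width):
--         if all(grid[row][col] == ' ' for row in range(height)):
--             separator_cols.append(col)
--
--     # Split into groups of columns
--     groups = []
--     start = 0
--     for sep in separator_cols:
--         if sep > start:
--             groups.append(list(range(start, sep)))
--         start = sep + 1
--     if start < width: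
--         groups.append(list(range(start, width)))
--
--     return groups, grid
-- ===== SOURCE B (Python) =====
-- def split_into_columns(grid):
--     # Single pass over columns: accumulate a run of non-separator columns,
--     # flush it into groups at each all-space separator column.
--     width = len(grid[0])
--     height = len(grid)
--
--     groups = []
--     current = []
--     for col in range(width):
--         if all(grid[row][col] == ' ' for row in range(height)):
--             if current:
--                 groups.append(current)
--                 current = []
--         else:
--             current.append(col)
--     if current:
--         groups.append(current)
--
--     return groups, grid
-- ===== Notes on version B (the rewrite author's own statement) =====
-- stated objective: simpler
-- what changed: Replaces A's two sequential phases (collect all separator-column indices, then carve index ranges between them with start/sep bookkeeping) by one accumulator-driven pass over columns that flushes the current run at each separator.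
import Mathlib
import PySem

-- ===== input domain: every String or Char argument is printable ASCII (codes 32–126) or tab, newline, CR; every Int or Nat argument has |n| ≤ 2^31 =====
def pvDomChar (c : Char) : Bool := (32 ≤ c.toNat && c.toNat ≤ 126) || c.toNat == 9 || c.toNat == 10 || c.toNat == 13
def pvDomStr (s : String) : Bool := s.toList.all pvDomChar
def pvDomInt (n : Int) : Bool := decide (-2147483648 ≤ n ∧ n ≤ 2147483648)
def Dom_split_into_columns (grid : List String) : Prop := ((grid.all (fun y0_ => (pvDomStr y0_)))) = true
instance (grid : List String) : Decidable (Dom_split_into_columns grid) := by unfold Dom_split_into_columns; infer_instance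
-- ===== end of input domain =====

-- B merges A's two phases (collect separator columns, then carve ranges) into one accumulator pass; objective: simpler.


-- shared by both ports: the per-column test "all(grid[row][col] == ' ' for row in range(height))",
-- identical text in both Pythons (none = IndexError; Pre_ excludes inputs where Python evaluates an out-of-range access)
def pvAllSpace (grid : List String) (height : Int) (col : Int) : Bool :=
  (PySem.List.pyRange 0 height 1).all (fun row =>
    ((PySem.List.pyGet? grid row).bind (fun r => PySem.Str.pyGet? r col)) == some ' ')

-- ===== PORT A =====
def split_into_columns (grid : List String) : List (List Int) × List String :=
  match grid with
  | [] => ([], [])  -- unreachable under Pre_: Python raises IndexError at grid[0]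
  | row0 :: _ =>
    let width : Int := PySem.Str.len row0
    let height : Int := (grid.length : Int)
    -- first loop: collect the all-space separator columns
    let separator_cols : List Int :=
      (PySem.List.pyRange 0 width 1).foldl
        (fun acc col => if pvAllSpace grid height col then acc ++ [col] else acc) []
    -- second loop: carve ranges between consecutive separators
    let st : List (List Int) × Int :=
      separator_cols.foldl
        (fun (q : List (List Int) × Int) sep =>
          (if sep > q.2 then q.1 ++ [PySem.List.pyRange q.2 sep 1] else q.1, sep + 1))
        ([], 0)
    let groups := if st.2 < width then st.1 ++ [PySem.List.pyRange st.2 width 1] else st.1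
    (groups, grid)

-- ===== PORT B =====
def split_into_columns_alt (grid : List String) : List (List Int) × List String :=
  match grid with
  | [] => ([], [])  -- unreachable under Pre_: Python raises IndexError at grid[0]
  | row0 :: _ =>
    let width : Int := PySem.Str.len row0
    let height : Int := (grid.length : Int)
    -- single pass: accumulate the current run of non-separator columns, flush at separators
    let st : List (List Int) × List Int :=
      (PySem.List.pyRange 0 width 1).foldl
        (fun (q : List (List Int) × List Int) col =>
          if pvAllSpace grid height col then
            (if q.2 ≠ [] then (q.1 ++ [q.2], ([] : List Int)) else (q.1, q.2))
          else (q.1, q.2 ++ [col]))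
        ([], [])
    (if st.2 ≠ [] then st.1 ++ [st.2] else st.1, grid)

-- ===== PRECONDITION & SPEC =====
-- Pre_ is exactly where Python A returns: grid nonempty, and for every column c < len(grid[0]),
-- the first row (in evaluation order) that is too short at c is preceded by a non-space, so the
-- short-circuiting `all` never evaluates an out-of-range index (else IndexError).
def Pre_split_into_columns (grid : List String) : Prop :=
  grid ≠ [] ∧ ∀ r < grid.length, ∀ c < (grid.headD "").toList.length,
    (∀ r' < r, ((grid.getD r' "").toList.getD c 'x') = ' ') →
    c < (grid.getD r "").toList.length
instance (grid : List String) : Decidable (Pre_split_into_columns grid) := by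
  unfold Pre_split_into_columns; infer_instance
def pvWitness_split_into_columns : List String := ["a b", "c d"]
def Spec_split_into_columns (grid : List String) (out : List (List Int) × List String) : Prop := out = split_into_columns_alt grid
instance (grid : List String) (out : List (List Int) × List String) : Decidable (Spec_split_into_columns grid out) := by unfold Spec_split_into_columns; infer_instance

-- ===== CLAIM (what is proved, stated in full; the proofs are below) =====
def Claim_equal_split_into_columns : Prop := ∀ (grid : List String), Dom_split_into_columns grid → Pre_split_into_columns grid → Spec_split_into_columns grid (split_into_columns grid)

-- ===== LEMMAS AND PROOFS =====

lemma pyRange_one_ne_nil_iff (s a : Int) : PySem.List.pyRange s a 1 ≠ [] ↔ s < a := by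
  rcases lt_or_ge s a with h | h
  · simp [PySem.List.pyRange_one_cons h, h]
  · simp [PySem.List.pyRange_one_eq_nil h, h, not_lt_of_ge h]

/-- Core invariant: B's single accumulator pass over columns `[a, a+n)` starting with the run
`[start, a)` already accumulated, followed by the final flush, computes the same group list as
A's carve loop over the separator columns (the filter of the same range) followed by A's final
range append. -/
lemma pvLoop_eq (p : Int → Bool) :
    ∀ (n : Nat) (a start : Int) (g : List (List Int)), start ≤ a →
    (let st := (PySem.List.pyRange a (a + n) 1).foldl
        (fun (q : List (List Int) × List Int) col =>
          if p col then
            (if q.2 ≠ [] then (q.1 ++ [q.2], ([] : List Int)) else (q.1, q.2))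
          else (q.1, q.2 ++ [col]))
        (g, PySem.List.pyRange start a 1)
     if st.2 ≠ [] then st.1 ++ [st.2] else st.1)
    =
    (let st := ((PySem.List.pyRange a (a + n) 1).filter p).foldl
        (fun (q : List (List Int) × Int) sep =>
          (if sep > q.2 then q.1 ++ [PySem.List.pyRange q.2 sep 1] else q.1, sep + 1))
        (g, start)
     if st.2 < a + n then st.1 ++ [PySem.List.pyRange st.2 (a + n) 1] else st.1) := by
  intro n
  induction n with
  | zero =>
    intro a start g h
    simp only [Nat.cast_zero, add_zero, PySem.List.pyRange_one_eq_nil (le_refl a),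
      List.foldl_nil, List.filter_nil]
    by_cases hlt : start < a
    · simp [(pyRange_one_ne_nil_iff start a).2 hlt, hlt]
    · simp [pyRange_one_ne_nil_iff, hlt]
  | succ n ih =>
    intro a start g h
    have hrange : a + ((n : Int) + 1) = (a + 1) + n := by ring
    push_cast
    rw [hrange, PySem.List.pyRange_one_cons (show a < (a + 1) + (n : Int) by omega)]
    by_cases hp : p a
    · -- separator column: B flushes the run, A carves [start, a) and restarts at a+1
      simp only [List.foldl_cons, List.filter_cons, hp, if_pos]
      by_cases hne : PySem.List.pyRange start a 1 ≠ []
      · have hlt : a > start := (pyRange_one_ne_nil_iff start a).1 hne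
        simp only [ite_true, hlt, gt_iff_lt]
        rw [if_pos hne]
        have := ih (a + 1) (a + 1) (g ++ [PySem.List.pyRange start a 1]) (le_refl _)
        rw [PySem.List.pyRange_one_eq_nil (le_refl (a + 1))] at this
        simpa [hlt] using this
      · have heq : PySem.List.pyRange start a 1 = [] := not_ne_iff.mp hne
        have hge : ¬ (a > start) := fun hlt => hne ((pyRange_one_ne_nil_iff start a).2 hlt)
        rw [heq]
        have := ih (a + 1) (a + 1) g (le_refl _)
        rw [PySem.List.pyRange_one_eq_nil (le_refl (a + 1))] at this
        simpa [hge] using this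
    · -- data column: B extends the run [start, a) to [start, a+1), A's filter drops it
      simp only [List.foldl_cons, List.filter_cons, hp, ite_false, Bool.false_eq_true]
      rw [← PySem.List.pyRange_one_succ_right h]
      exact ih (a + 1) start g (by omega)

-- ===== VERDICT (by name: the statement is the Claim_ definition above) =====
theorem split_into_columns_spec : Claim_equal_split_into_columns := by
  intro grid _ _
  unfold Spec_split_into_columns split_into_columns split_into_columns_alt
  match grid with
  | [] => rfl
  | row0 :: rest =>
    simp only []
    set grid' := row0 :: rest with hg
    set width : Int := PySem.Str.len row0 with hw
    have hw0 : 0 ≤ width := by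
      rw [hw, PySem.Str.len_eq]; positivity
    have hwn : (0 : Int) + ((width.toNat : Nat) : Int) = width := by omega
    have := pvLoop_eq (pvAllSpace grid' (grid'.length : Int)) width.toNat 0 0 [] (le_refl 0)
    rw [hwn, PySem.List.pyRange_one_eq_nil (le_refl (0 : Int))] at this
    -- A's first loop (append-if fold) builds exactly the filtered column list
    rw [PySem.List.foldl_append_if_eq_filter]
    simp only [List.nil_append]
    exact congrArg (fun l => (l, grid')) this.symm
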